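-- pv_equiv track=rewrite | github.com/Jachdich/experimental-vm | newlang_compiler/assembler.py | doEscapes
-- ===== SOURCE A (Python) =====
-- def doEscapes(x):
--     out = ""
--     escapeNext = False
--     for c in x:
--         if escapeNext:
--             if c == "\\":
--                 out += "\\"
--             elif c == "n":
--                 out += "\n"
--             else:
--                 error(f"Syntax error: Invalid escape sequence '{x}'")
--             escapeNext = False
--             continue
--         if c == "\\":
--             escapeNext = True
--             continue
--         out += c
--     return out
-- ===== SOURCE B (Python) =====
-- def doEscapes(x):
--     # Split on every backslash once; each boundary starts an escape sequence.
--     parts = x.split("\\")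
--     out = [parts[0]]
--     i = 1
--     n = len(parts)
--     while i < n:
--         p = parts[i]
--         if p == "":
--             if i + 1 == n:
--                 break  # lone trailing backslash: dropped, as the scanner never sees a next char
--             out.append("\\" + parts[i + 1])  # escaped backslash, next piece verbatim
--             i += 2
--         elif p[0] == "n":
--             out.append("\n" + p[1:])
--             i += 1
--         else:
--             error(f"Syntax error: Invalid escape sequence '{x}'")
--     return "".join(out)
-- ===== Notes on version B (the rewrite author's own statement) =====
-- stated objective: faster
-- what changed: B splits the string on backslashes once (str.split) and reassembles the pieces with join, branching per piece, instead of A's per-character scan with an escapeNext flag.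
import Mathlib
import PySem

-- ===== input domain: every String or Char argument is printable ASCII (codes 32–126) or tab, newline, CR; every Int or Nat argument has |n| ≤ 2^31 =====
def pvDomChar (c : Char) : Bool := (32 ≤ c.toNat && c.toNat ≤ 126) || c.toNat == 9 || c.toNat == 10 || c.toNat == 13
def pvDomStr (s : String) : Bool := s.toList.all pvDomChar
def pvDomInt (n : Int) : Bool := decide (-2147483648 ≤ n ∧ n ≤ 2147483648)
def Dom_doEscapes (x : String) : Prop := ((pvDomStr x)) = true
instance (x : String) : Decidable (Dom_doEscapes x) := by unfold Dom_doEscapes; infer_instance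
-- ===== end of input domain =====

-- B replaces A's per-character escapeNext scan by one split on '\\' plus a reassembling pass
-- over the pieces (a constant-factor speedup in Python); return values agree on Pre_.

-- ===== PORT A =====
-- A's for-loop over the characters with the accumulator `out` and the flag `escapeNext`.
-- In the invalid-escape branch A calls error(...), which is undefined in the module, so A
-- raises there; those inputs are excluded by Pre_ and this arm's value is never claimed.
def doEscapesLoop : List Char → List Char → Bool → List Char
  | [], out, _ => out
  | c :: cs, out, escapeNext =>
    if escapeNext then
      if c = '\\' then doEscapesLoop cs (out ++ ['\\']) false
      else if c = 'n' then doEscapesLoop cs (out ++ ['\n']) false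
      else doEscapesLoop cs out false   -- error(...): raises in Python, outside Pre_
    else if c = '\\' then doEscapesLoop cs out true
    else doEscapesLoop cs (out ++ [c]) false

def doEscapes (x : String) : String := String.ofList (doEscapesLoop x.toList [] false)

-- ===== PORT B =====
-- B's while-loop over the pieces of x.split("\\"): an empty piece is an escaped backslash
-- (consume the next piece verbatim; a lone trailing empty piece is a trailing backslash,
-- dropped); a piece starting with 'n' is a newline escape; anything else is error(...).
def procParts : List (List Char) → List Char
  | [] => []
  | [[]] => []                                       -- trailing backslash: dropped
  | [] :: q :: rest => '\\' :: (q ++ procParts rest) -- escaped backslash + next piece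
  | ('n' :: t) :: rest => '\n' :: (t ++ procParts rest)
  | (_ :: _) :: rest => procParts rest               -- error(...): raises in Python, outside Pre_

def doEscapes_alt (x : String) : String :=
  match x.toList.splitOn '\\' with                   -- x.split("\\")
  | [] => ""                                         -- unreachable: split is never empty
  | p :: rest => String.ofList (p ++ procParts rest)     -- "".join(out)

-- ===== PRECONDITION & SPEC =====
-- Pre_ excludes exactly the strings containing an invalid escape sequence (a backslash
-- escaping a character other than '\' or 'n'): there A calls error(...), a name undefined
-- in the module, and raises instead of returning.  A lone trailing backslash is fine.
def okEsc : List Char → Bool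
  | [] => true
  | [_] => true
  | c :: d :: rest =>
    if c = '\\' then (d == '\\' || d == 'n') && okEsc rest
    else okEsc (d :: rest)

def Pre_doEscapes (x : String) : Prop := okEsc x.toList = true
instance (x : String) : Decidable (Pre_doEscapes x) := by unfold Pre_doEscapes; infer_instance
def pvWitness_doEscapes : String := "ab\\ncd\\\\e"

def Spec_doEscapes (x : String) (out : String) : Prop := out = doEscapes_alt x
instance (x : String) (out : String) : Decidable (Spec_doEscapes x out) := by unfold Spec_doEscapes; infer_instance

-- ===== CLAIM (what is proved, stated in full; the proofs are below) =====
def Claim_equal_doEscapes : Prop := ∀ (x : String), Dom_doEscapes x → Pre_doEscapes x → Spec_doEscapes x (doEscapes x)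

-- ===== LEMMAS AND PROOFS =====

-- B's result as a function of the character list (head piece ++ processed tail pieces).
def bCore (cs : List Char) : List Char :=
  (cs.splitOn '\\').headI ++ procParts (cs.splitOn '\\').tail

theorem splitOn_cons' (a x : Char) (xs : List Char) :
    (x :: xs).splitOn a =
      if x == a then [] :: xs.splitOn a else (xs.splitOn a).modifyHead (List.cons x) := by
  simp [List.splitOn, List.splitOnP_cons]

theorem splitOn_ne_nil' (a : Char) (xs : List Char) : xs.splitOn a ≠ [] :=
  List.splitOnP_ne_nil _ xs

-- one-step unfoldings of A's loop
theorem loop_plain (c : Char) (cs out : List Char) (hc : ¬ c = '\\') :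
    doEscapesLoop (c :: cs) out false = doEscapesLoop cs (out ++ [c]) false := by
  conv_lhs => rw [doEscapesLoop]
  rw [if_neg (by simp), if_neg hc]

theorem loop_bs (cs out : List Char) :
    doEscapesLoop ('\\' :: cs) out false = doEscapesLoop cs out true := by
  conv_lhs => rw [doEscapesLoop]
  rw [if_neg (by simp), if_pos rfl]

theorem loop_esc_bs (cs out : List Char) :
    doEscapesLoop ('\\' :: cs) out true = doEscapesLoop cs (out ++ ['\\']) false := by
  conv_lhs => rw [doEscapesLoop]
  rw [if_pos rfl, if_pos rfl]

theorem loop_esc_n (cs out : List Char) :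
    doEscapesLoop ('n' :: cs) out true = doEscapesLoop cs (out ++ ['\n']) false := by
  conv_lhs => rw [doEscapesLoop]
  rw [if_pos rfl, if_neg (by decide), if_pos rfl]

-- Main invariant: on valid input, A's scan from any accumulator appends exactly bCore.
theorem loop_eq_bCore : ∀ (cs : List Char), okEsc cs = true →
    ∀ out : List Char, doEscapesLoop cs out false = out ++ bCore cs
  | [], _, out => by simp [doEscapesLoop, bCore, List.splitOn, procParts]
  | [c], _, out => by
    by_cases hc : c = '\\'
    · subst hc
      rw [loop_bs]
      simp [doEscapesLoop, bCore, List.splitOn, procParts]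
    · rw [loop_plain c [] out hc]
      simp [doEscapesLoop, bCore, hc, List.splitOn, procParts]
  | c :: d :: rest, h, out => by
    obtain ⟨hd0, t0, hsplit⟩ := List.exists_cons_of_ne_nil (splitOn_ne_nil' '\\' rest)
    by_cases hc : c = '\\'
    · subst hc
      simp only [okEsc, reduceIte, Bool.and_eq_true, Bool.or_eq_true, beq_iff_eq] at h
      have ih := loop_eq_bCore rest h.2
      rcases h.1 with hd | hd
      · subst hd
        rw [loop_bs, loop_esc_bs, ih]
        simp [bCore, splitOn_cons', hsplit, procParts, List.append_assoc]
      · subst hd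
        rw [loop_bs, loop_esc_n, ih]
        simp [bCore, splitOn_cons', hsplit, procParts, List.append_assoc]
    · have h' : okEsc (d :: rest) = true := by
        simpa [okEsc, hc] using h
      have ih := loop_eq_bCore (d :: rest) h'
      obtain ⟨hd1, t1, hsplit1⟩ := List.exists_cons_of_ne_nil (splitOn_ne_nil' '\\' (d :: rest))
      rw [loop_plain c (d :: rest) out hc, ih]
      simp [bCore, splitOn_cons', hc, hsplit1, List.append_assoc]

theorem alt_eq_bCore (x : String) : doEscapes_alt x = String.ofList (bCore x.toList) := by
  obtain ⟨p, rest, hsplit⟩ := List.exists_cons_of_ne_nil (splitOn_ne_nil' '\\' x.toList)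
  simp [doEscapes_alt, bCore, hsplit]

-- ===== VERDICT (by name: the statement is the Claim_ definition above) =====
theorem doEscapes_spec : Claim_equal_doEscapes := by
  intro x _ hpre
  unfold Spec_doEscapes doEscapes
  rw [loop_eq_bCore x.toList hpre [], alt_eq_bCore]
  simp
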